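-- pv_equiv track=rewrite | github.com/navkant/ds_algo_day_wise | day_8/odd_even_subsequence.py | odd_even_subsequence
-- ===== SOURCE A (Python) =====
-- from typing import List
--
-- def odd_even_subsequence(A: List[int]) -> int:
--     state = -1
--     count = 0
--
--     for i,v in enumerate(A):
--         if v % 2 != state:
--             count += 1
--             state = v % 2
--         else:
--             pass
--
--     return count
-- ===== SOURCE B (Python) =====
-- from typing import List
--
-- def odd_even_subsequence(A: List[int]) -> int:
--     # Stage 1: reduce the input to its parity sequence.
--     parities = [x % 2 for x in A]
--     # Stage 2: count maximal runs of equal values by skipping over each run.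
--     count = 0
--     i, n = 0, len(parities)
--     while i < n:
--         p = parities[i]
--         i += 1
--         while i < n and parities[i] == p:
--             i += 1
--         count += 1
--     return count
-- ===== Notes on version B (the rewrite author's own statement) =====
-- stated objective: alternative
-- what changed: Replaces A's sentinel-initialised state-tracking fold by a staged decomposition: first map the list to its parities, then count maximal runs of equal parity by skipping over each leading run (groupby-style), instead of comparing every element to a carried state.
import Mathlib
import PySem

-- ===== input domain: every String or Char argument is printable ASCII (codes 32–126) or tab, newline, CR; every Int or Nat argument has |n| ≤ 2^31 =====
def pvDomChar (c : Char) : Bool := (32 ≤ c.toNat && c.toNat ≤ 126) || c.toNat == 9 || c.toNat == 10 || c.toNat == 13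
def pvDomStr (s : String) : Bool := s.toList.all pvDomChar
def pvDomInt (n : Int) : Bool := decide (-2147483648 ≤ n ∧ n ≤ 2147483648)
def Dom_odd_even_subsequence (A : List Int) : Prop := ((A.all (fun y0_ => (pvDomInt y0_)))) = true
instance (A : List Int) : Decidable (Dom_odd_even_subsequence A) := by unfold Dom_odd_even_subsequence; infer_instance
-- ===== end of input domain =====

-- B maps the list to parities first and counts maximal runs by recursively stripping the leading run, instead of A's sentinel-state fold.


-- ===== PORT A =====
def odd_even_subsequence (A : List Int) : Int :=
  (A.foldl
    (fun (sc : Int × Int) v =>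
      if PySem.Int.mod v 2 ≠ sc.1 then (PySem.Int.mod v 2, sc.2 + 1) else sc)
    (-1, 0)).2

-- ===== PORT B =====
-- count maximal runs of equal values: strip the leading run, recurse on the rest
def pvRuns : List Int → Int
  | [] => 0
  | p :: ps => 1 + pvRuns (ps.dropWhile (· == p))
termination_by l => l.length
decreasing_by
  exact Nat.lt_succ_of_le (List.length_dropWhile_le _ _)

def odd_even_subsequence_alt (A : List Int) : Int :=
  pvRuns (A.map (fun x => PySem.Int.mod x 2))

-- ===== PRECONDITION & SPEC =====
def Spec_odd_even_subsequence (A : List Int) (out : Int) : Prop := out = odd_even_subsequence_alt A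
instance (A : List Int) (out : Int) : Decidable (Spec_odd_even_subsequence A out) := by unfold Spec_odd_even_subsequence; infer_instance

-- ===== CLAIM (what is proved, stated in full; the proofs are below) =====
def Claim_equal_odd_even_subsequence : Prop := ∀ (A : List Int), Dom_odd_even_subsequence A → Spec_odd_even_subsequence A (odd_even_subsequence A)

-- ===== LEMMAS AND PROOFS =====

-- A's loop, phrased on the parity list: count a new run whenever the head differs from the state
def pvRunsFrom (s : Int) : List Int → Int
  | [] => 0
  | p :: ps => if p ≠ s then 1 + pvRunsFrom p ps else pvRunsFrom s ps

lemma pvFold_eq (xs : List Int) : ∀ (s c : Int),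
    (xs.foldl
      (fun (sc : Int × Int) v =>
        if PySem.Int.mod v 2 ≠ sc.1 then (PySem.Int.mod v 2, sc.2 + 1) else sc)
      (s, c)).2
    = c + pvRunsFrom s (xs.map (fun x => PySem.Int.mod x 2)) := by
  induction xs with
  | nil => intro s c; simp [pvRunsFrom]
  | cons v vs ih =>
    intro s c
    rw [List.foldl_cons, List.map_cons]
    by_cases h : PySem.Int.mod v 2 = s
    · dsimp only
      rw [if_neg (fun hn => hn h), ih s c, pvRunsFrom, if_neg (fun hn => hn h)]
    · dsimp only
      rw [if_pos h, ih (PySem.Int.mod v 2) (c + 1), pvRunsFrom, if_pos h]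
      ring

lemma pvRunsFrom_eq_runs_dropWhile (ps : List Int) : ∀ (p : Int),
    pvRunsFrom p ps = pvRuns (ps.dropWhile (· == p)) := by
  induction ps with
  | nil => intro p; simp [pvRunsFrom, pvRuns]
  | cons q qs ih =>
    intro p
    by_cases h : q = p
    · rw [pvRunsFrom, if_neg (fun hn => hn h), List.dropWhile_cons_of_pos (by simp [h]),
        ih p]
    · rw [pvRunsFrom, if_pos h, List.dropWhile_cons_of_neg (by simp [h]), pvRuns, ih q]

lemma pvMod2_ne_neg_one (v : Int) : PySem.Int.mod v 2 ≠ -1 := by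
  have h1 := PySem.Int.mod_nonneg v (b := 2) (by norm_num)
  omega

-- ===== VERDICT (by name: the statement is the Claim_ definition above) =====
theorem odd_even_subsequence_spec : Claim_equal_odd_even_subsequence := by
  intro A _
  unfold Spec_odd_even_subsequence odd_even_subsequence odd_even_subsequence_alt
  rw [pvFold_eq, zero_add]
  cases A with
  | nil => simp [pvRunsFrom, pvRuns]
  | cons x xs =>
    rw [List.map_cons, pvRunsFrom, if_pos (pvMod2_ne_neg_one x), pvRuns,
      pvRunsFrom_eq_runs_dropWhile]
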